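-- pv_equiv track=rewrite | github.com/aaronjrod/DCP | D221.py | sevenish
-- ===== SOURCE A (Python) =====
-- def sevenish(n):
--     last_power_index = 0
--     add_index = 0
--     mem = [1] * n
--
--     for i in range(1, n):
--         if add_index == last_power_index:
--             add_index = 0
--             mem[i] = mem[last_power_index] * 7
--             last_power_index = i
--         else:
--             mem[i] = mem[last_power_index] + mem[add_index]
--             add_index += 1
--
--     return mem
-- ===== SOURCE B (Python) =====
-- def sevenish(n):
--     res = []
--     for i in range(n):
--         k = i + 1
--         v = 0
--         p = 1
--         while k:
--             if k & 1:
--                 v += p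
--             k >>= 1
--             p *= 7
--         res.append(v)
--     return res
-- ===== Notes on version B (the rewrite author's own statement) =====
-- stated objective: alternative
-- what changed: Replaces A's in-place array recurrence with last_power_index/add_index bookkeeping by a direct per-element closed form: each output element is the sum of powers of seven selected by the binary digits of its one-based position, computed independently.
import Mathlib
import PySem

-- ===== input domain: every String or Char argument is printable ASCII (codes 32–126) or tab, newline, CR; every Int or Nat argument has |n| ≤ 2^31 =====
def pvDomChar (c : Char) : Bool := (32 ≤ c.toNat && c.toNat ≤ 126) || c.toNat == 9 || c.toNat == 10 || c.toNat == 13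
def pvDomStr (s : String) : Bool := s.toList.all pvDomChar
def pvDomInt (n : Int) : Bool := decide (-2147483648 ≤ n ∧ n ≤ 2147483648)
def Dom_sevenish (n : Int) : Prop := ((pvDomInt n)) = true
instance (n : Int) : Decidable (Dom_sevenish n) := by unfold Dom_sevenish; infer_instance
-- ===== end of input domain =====

-- B computes each sevenish number directly from the binary expansion of its index
-- instead of A's in-place recurrence over earlier array entries (objective: alternative).


-- ===== PORT A =====
-- loop body of A's for-loop; state = (last_power_index, add_index, mem).
-- All indices used are provably in range, so the total pyGetD/pySetD forms are exact here.
def sevenishStep (s : Int × Int × List Int) (i : Int) : Int × Int × List Int :=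
  if s.2.1 = s.1 then
    (i, 0, PySem.List.pySetD s.2.2 i (PySem.List.pyGetD s.2.2 s.1 0 * 7))
  else
    (s.1, s.2.1 + 1,
      PySem.List.pySetD s.2.2 i (PySem.List.pyGetD s.2.2 s.1 0 + PySem.List.pyGetD s.2.2 s.2.1 0))

def sevenish (n : Int) : List Int :=
  let mem := PySem.List.pyRepeat [(1 : Int)] n
  let s := (PySem.List.pyRange 1 n 1).foldl sevenishStep (0, 0, mem)
  s.2.2

-- ===== PORT B =====
-- the inner 'while k' loop of Source B: sum of p*7^j over the set bits of k (k&1 is k%2; k>>=1 is k/2)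
def sevenishBits (k : Nat) (p : Int) : Int :=
  if k = 0 then 0
  else (if k % 2 = 1 then p else 0) + sevenishBits (k / 2) (p * 7)
termination_by k
decreasing_by exact Nat.div_lt_self (Nat.pos_of_ne_zero (by assumption)) (by omega)

def sevenish_alt (n : Int) : List Int :=
  (PySem.List.pyRange 0 n 1).foldl (fun res i => res ++ [sevenishBits (i + 1).toNat 1]) []

-- ===== PRECONDITION & SPEC =====
def Spec_sevenish (n : Int) (out : List Int) : Prop := out = sevenish_alt n
instance (n : Int) (out : List Int) : Decidable (Spec_sevenish n out) := by unfold Spec_sevenish; infer_instance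

-- ===== CLAIM (what is proved, stated in full; the proofs are below) =====
def Claim_equal_sevenish : Prop := ∀ (n : Int), Dom_sevenish n → Spec_sevenish n (sevenish n)

-- ===== LEMMAS AND PROOFS =====

-- the k-th sevenish number (k ≥ 1): sum of 7^j over the set bits of k
def gsev (k : Nat) : Int := sevenishBits k 1

lemma sevenishBits_eq (k : Nat) (p : Int) : sevenishBits k p
    = if k = 0 then 0 else (if k % 2 = 1 then p else 0) + sevenishBits (k / 2) (p * 7) := by
  rw [sevenishBits]

lemma sevenishBits_mul (k : Nat) (p : Int) : sevenishBits k p = p * sevenishBits k 1 := by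
  induction k using Nat.strong_induction_on generalizing p with
  | _ k ih =>
    rw [sevenishBits_eq k p, sevenishBits_eq k 1]
    by_cases hk : k = 0
    · simp [hk]
    · have hlt : k / 2 < k := Nat.div_lt_self (Nat.pos_of_ne_zero hk) (by omega)
      simp only [hk, if_false]
      rw [ih _ hlt (p * 7), ih _ hlt (1 * 7)]
      split_ifs <;> ring

lemma gsev_rec (k : Nat) : gsev k = (if k % 2 = 1 then 1 else 0) + 7 * gsev (k / 2) := by
  by_cases hk : k = 0
  · simp [hk, gsev, sevenishBits]
  · unfold gsev
    rw [sevenishBits_eq]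
    simp only [hk, if_false]
    rw [sevenishBits_mul (k / 2) (1 * 7)]
    ring_nf

lemma gsev_zero : gsev 0 = 0 := by simp [gsev, sevenishBits]

lemma gsev_pow_add (m a : Nat) (h : a < 2 ^ m) : gsev (2 ^ m + a) = 7 ^ m + gsev a := by
  induction m generalizing a with
  | zero =>
    interval_cases a
    simp [gsev_rec 1, gsev_zero]
  | succ m ih =>
    have h2 : 2 ^ (m + 1) = 2 * 2 ^ m := by ring
    have hhalf : (2 ^ (m + 1) + a) / 2 = 2 ^ m + a / 2 := by omega
    have hmod : (2 ^ (m + 1) + a) % 2 = a % 2 := by omega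
    have ha2 : a / 2 < 2 ^ m := by omega
    rw [gsev_rec (2 ^ (m + 1) + a), hhalf, hmod, ih _ ha2, gsev_rec a]
    ring

lemma gsev_pow (m : Nat) : gsev (2 ^ m) = 7 ^ m := by
  simpa [gsev_zero] using gsev_pow_add m 0 (Nat.two_pow_pos m)

-- the mem array after processing loop indices 1..t: entries 0..t hold the sevenish numbers, the rest still 1
def memv (N t : Nat) : List Int := (List.range N).map (fun j => if j ≤ t then gsev (j + 1) else 1)

lemma memv_getD (N t j : Nat) (h1 : j ≤ t) (h2 : j < N) :
    PySem.List.pyGetD (memv N t) (j : Int) 0 = gsev (j + 1) := by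
  rw [PySem.List.pyGetD_natCast]
  simp [memv, List.getD_eq_getElem?_getD, h2, h1]

lemma memv_set (N t : Nat) (_hN : t + 1 < N) :
    (memv N t).set (t + 1) (gsev (t + 2)) = memv N (t + 1) := by
  apply List.ext_getElem (by simp [memv])
  intro i hi hi'
  rw [List.getElem_set]
  simp only [memv, List.getElem_map, List.getElem_range]
  by_cases h1 : t + 1 = i
  · subst h1
    simp
  · rw [if_neg h1]
    by_cases h2 : i ≤ t
    · rw [if_pos h2, if_pos (by omega)]
    · rw [if_neg h2, if_neg (by omega)]

lemma memv_zero (N : Nat) : memv N 0 = List.replicate N 1 := by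
  apply List.ext_getElem
  · simp [memv]
  · intro i hi hi'
    simp only [memv, List.getElem_map, List.getElem_range, List.getElem_replicate]
    split_ifs with h
    · have h0 : i = 0 := by omega
      subst h0
      simp [gsev_rec 1, gsev_zero]
    · rfl

-- loop invariant: after processing i = 1..t (with 2^m ≤ t+1 < 2^(m+1)),
-- last_power_index = 2^m - 1, add_index = t+1 - 2^m, and mem = memv N t
lemma sevenish_loop (N : Nat) : ∀ t m : Nat, t < N → 2 ^ m ≤ t + 1 → t + 1 < 2 ^ (m + 1) →
    (PySem.List.pyRange 1 ((t : Int) + 1) 1).foldl sevenishStep (0, 0, List.replicate N (1 : Int))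
      = (((2 ^ m : Nat) : Int) - 1, ((t : Int) + 1) - ((2 ^ m : Nat) : Int), memv N t) := by
  intro t
  induction t with
  | zero =>
    intro m _ hm1 hm2
    have hm0 : m = 0 := by
      by_contra h
      have : 2 ≤ 2 ^ m := by
        calc 2 = 2 ^ 1 := by norm_num
        _ ≤ 2 ^ m := Nat.pow_le_pow_right (by norm_num) (by omega)
      omega
    subst hm0
    rw [PySem.List.pyRange_one_eq_nil (by norm_num)]
    norm_num [memv_zero]
  | succ t ih =>
    intro m hN hm1 hm2
    have hc : ((t + 1 : Nat) : Int) = (t : Int) + 1 := by push_cast; ring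
    rw [hc]
    have hstep : (PySem.List.pyRange 1 ((t : Int) + 1 + 1) 1)
        = PySem.List.pyRange 1 ((t : Int) + 1) 1 ++ [(t : Int) + 1] := by
      exact PySem.List.pyRange_one_succ_right (by omega)
    rw [hstep, List.foldl_append]
    by_cases hpow : t + 2 = 2 ^ m
    · -- case (a): t+1 closes a power-of-two block; previous block has exponent m-1
      have hm : 1 ≤ m := by
        by_contra h
        interval_cases m
        omega
      obtain ⟨m', rfl⟩ : ∃ m', m = m' + 1 := ⟨m - 1, by omega⟩
      have h2 : 2 ^ (m' + 1) = 2 * 2 ^ m' := by ring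
      have hp : 1 ≤ 2 ^ m' := Nat.one_le_two_pow
      have ih' := ih m' (by omega) (by omega) (by omega)
      rw [ih']
      have heq : ((t : Int) + 1) - ((2 ^ m' : Nat) : Int) = ((2 ^ m' : Nat) : Int) - 1 := by
        omega
      rw [heq]
      simp only [List.foldl_cons, List.foldl_nil, sevenishStep, if_true]
      have hidx : ((2 ^ m' : Nat) : Int) - 1 = (((2 ^ m' - 1 : Nat)) : Int) := by omega
      have hget : PySem.List.pyGetD (memv N t) (((2 ^ m' : Nat) : Int) - 1) 0 = gsev (2 ^ m') := by
        rw [hidx, memv_getD N t (2 ^ m' - 1) (by omega) (by omega)]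
        congr 1
        omega
      have hval : gsev (2 ^ m') * 7 = gsev (t + 2) := by
        rw [hpow, gsev_pow, gsev_pow]; ring
      rw [hget, hval]
      have hset : PySem.List.pySetD (memv N t) ((t : Int) + 1) (gsev (t + 2)) = memv N (t + 1) := by
        have : ((t : Int) + 1) = ((t + 1 : Nat) : Int) := by push_cast; ring
        rw [this, PySem.List.pySetD_natCast, memv_set N t hN]
      rw [hset]
      refine Prod.ext ?_ (Prod.ext ?_ rfl) <;> simp only [] <;> omega
    · -- case (b): still inside the block of exponent m
      have h2 : 2 ^ (m + 1) = 2 * 2 ^ m := by ring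
      have hp : 1 ≤ 2 ^ m := Nat.one_le_two_pow
      have ih' := ih m (by omega) (by omega) (by omega)
      rw [ih']
      have hne : ((t : Int) + 1) - ((2 ^ m : Nat) : Int) ≠ ((2 ^ m : Nat) : Int) - 1 := by
        omega
      simp only [List.foldl_cons, List.foldl_nil, sevenishStep, if_neg hne]
      have hidx1 : ((2 ^ m : Nat) : Int) - 1 = (((2 ^ m - 1 : Nat)) : Int) := by omega
      have hidx2 : ((t : Int) + 1) - ((2 ^ m : Nat) : Int) = (((t + 1 - 2 ^ m : Nat)) : Int) := by omega
      have hget1 : PySem.List.pyGetD (memv N t) (((2 ^ m : Nat) : Int) - 1) 0 = gsev (2 ^ m) := by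
        rw [hidx1, memv_getD N t (2 ^ m - 1) (by omega) (by omega)]
        congr 1
        omega
      have hget2 : PySem.List.pyGetD (memv N t) (((t : Int) + 1) - ((2 ^ m : Nat) : Int)) 0
          = gsev (t + 1 - 2 ^ m + 1) := by
        rw [hidx2, memv_getD N t (t + 1 - 2 ^ m) (by omega) (by omega)]
      have hval : gsev (2 ^ m) + gsev (t + 1 - 2 ^ m + 1) = gsev (t + 2) := by
        have ha : t + 1 - 2 ^ m + 1 < 2 ^ m := by omega
        have hsum := gsev_pow_add m (t + 1 - 2 ^ m + 1) ha
        rw [show 2 ^ m + (t + 1 - 2 ^ m + 1) = t + 2 by omega] at hsum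
        rw [gsev_pow]
        omega
      rw [hget1, hget2, hval]
      have hset : PySem.List.pySetD (memv N t) ((t : Int) + 1) (gsev (t + 2)) = memv N (t + 1) := by
        have : ((t : Int) + 1) = ((t + 1 : Nat) : Int) := by push_cast; ring
        rw [this, PySem.List.pySetD_natCast, memv_set N t hN]
      rw [hset]
      refine Prod.ext rfl (Prod.ext ?_ rfl)
      simp only []
      omega

lemma sevenish_eq_map (n : Int) :
    sevenish n = (List.range n.toNat).map (fun j => gsev (j + 1)) := by
  by_cases hn : n ≤ 0
  · simp [sevenish, PySem.List.pyRange_one_eq_nil (by omega : n ≤ 1), PySem.List.pyRepeat,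
      Int.toNat_of_nonpos hn]
  · have hn' : 0 < n := by omega
    set N := n.toNat with hN
    have hN1 : 1 ≤ N := by omega
    obtain ⟨m, hm1, hm2⟩ : ∃ m, 2 ^ m ≤ N ∧ N < 2 ^ (m + 1) :=
      ⟨N.log2, Nat.log2_self_le (by omega), Nat.lt_log2_self⟩
    have hn' : n = ((N : Nat) : Int) := by omega
    have hrep : PySem.List.pyRepeat [(1 : Int)] n = List.replicate N 1 := by
      rw [PySem.List.pyRepeat_singleton]
    have hloop := sevenish_loop N (N - 1) m (by omega) (by omega) (by omega)
    have hrange : ((N - 1 : Nat) : Int) + 1 = n := by omega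
    rw [hrange] at hloop
    simp only [sevenish, hrep, hloop]
    apply List.ext_getElem (by simp [memv])
    intro i hi hi'
    have hiN : i < N := by simpa [memv] using hi
    simp only [memv, List.getElem_map, List.getElem_range]
    rw [if_pos (by omega)]

lemma sevenish_alt_eq_map (n : Int) :
    sevenish_alt n = (List.range n.toNat).map (fun j => gsev (j + 1)) := by
  unfold sevenish_alt
  rw [PySem.List.foldl_append_singleton_eq_map, List.nil_append]
  by_cases hn : n ≤ 0
  · simp [PySem.List.pyRange_one_eq_nil hn, Int.toNat_of_nonpos hn]
  · have : n = ((n.toNat : Nat) : Int) := by omega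
    rw [this, PySem.List.pyRange_zero_natCast]
    rw [List.map_map]
    apply List.map_congr_left
    intro j hj
    have hcast : (((j : Nat) : Int) + 1).toNat = j + 1 := by omega
    simp [gsev, hcast]

-- ===== VERDICT (by name: the statement is the Claim_ definition above) =====
theorem sevenish_spec : Claim_equal_sevenish := by
  intro n _
  unfold Spec_sevenish
  rw [sevenish_eq_map, sevenish_alt_eq_map]
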